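-- pv_equiv track=rewrite | github.com/avikram553/Job-Application-Intelligent-System | src/generator/document_generator_server.py | _reorder_skills
-- ===== SOURCE A (Python) =====
-- from typing import Dict, Any, List
--
-- def _reorder_skills(skills: Dict, required_skills: List[str]) -> Dict:
--     """Reorder skills to show matched skills first"""
--     reordered = {}
--     required_lower = [s.lower().strip() for s in required_skills]
--
--     for category, skill_list in skills.items():
--         if not isinstance(skill_list, list):
--             reordered[category] = skill_list
--             continue
--
--         matched = [s for s in skill_list if s.lower().strip() in required_lower]
--         unmatched = [s for s in skill_list if s.lower().strip() not in required_lower]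
--         reordered[category] = matched + unmatched
--
--     return reordered
-- ===== SOURCE B (Python) =====
-- def _reorder_skills(skills, required_skills):
--     """Reorder skills to show matched skills first (stable sort on a boolean key)."""
--     required_lower = {s.lower().strip() for s in required_skills}
--
--     def reorder(skill_list):
--         if not isinstance(skill_list, list):
--             return skill_list
--         # stable sort: matched (key False) sort before unmatched (key True),
--         # original order kept within each group
--         return sorted(skill_list, key=lambda s: s.lower().strip() not in required_lower)
--
--     return {category: reorder(skill_list) for category, skill_list in skills.items()}
-- ===== Notes on version B (the rewrite author's own statement) =====
-- stated objective: faster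
-- what changed: Replaces the two partitioning list comprehensions per category with one stable sort on a boolean membership key (matched=False sorts first; stability keeps intra-group order), with required_lower built once as a set so each membership test is O(1) instead of a scan of required_skills.
import Mathlib
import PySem

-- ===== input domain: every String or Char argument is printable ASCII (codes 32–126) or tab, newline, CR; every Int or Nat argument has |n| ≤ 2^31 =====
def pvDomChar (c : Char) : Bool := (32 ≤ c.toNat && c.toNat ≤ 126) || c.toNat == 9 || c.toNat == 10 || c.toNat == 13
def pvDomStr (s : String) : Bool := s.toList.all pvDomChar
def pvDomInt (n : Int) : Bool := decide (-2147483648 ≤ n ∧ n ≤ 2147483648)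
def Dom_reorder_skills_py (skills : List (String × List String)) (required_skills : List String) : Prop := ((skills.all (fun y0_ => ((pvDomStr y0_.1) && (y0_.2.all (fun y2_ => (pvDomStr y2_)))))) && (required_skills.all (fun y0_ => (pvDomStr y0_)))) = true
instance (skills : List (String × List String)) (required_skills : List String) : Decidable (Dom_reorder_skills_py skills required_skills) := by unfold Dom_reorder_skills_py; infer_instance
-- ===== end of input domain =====

-- B replaces the per-category matched/unmatched double scan with one stable sort on a
-- boolean key over a set of normalized required skills (same results, set membership).

-- ===== PORT A =====
def reorder_skills_py (skills : List (String × List String)) (required_skills : List String) : List (String × List String) :=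
  let required_lower := required_skills.map (fun s => PySem.Str.strip (PySem.Str.lower s))
  -- skill_list is always a list under the type convention, so the isinstance guard is always taken;
  -- dict keys are unique in a Python dict, so insertion into `reordered` is plain append.
  skills.foldl (fun reordered cs =>
    let matched := cs.2.filter (fun s => required_lower.contains (PySem.Str.strip (PySem.Str.lower s)))
    let unmatched := cs.2.filter (fun s => !(required_lower.contains (PySem.Str.strip (PySem.Str.lower s))))
    reordered ++ [(cs.1, matched ++ unmatched)]) []

-- ===== PORT B =====
-- Source B's inner helper `reorder`: stable sort on the boolean "not matched" key.
def altReorderOne (required_lower : PySem.Set String) (skill_list : List String) : List String :=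
  PySem.List.sorted skill_list (fun s => !(required_lower.contains (PySem.Str.strip (PySem.Str.lower s)))) false

-- the dict comprehension, transcribed as structural recursion over the items
def altBuild (required_lower : PySem.Set String) : List (String × List String) → List (String × List String)
  | [] => []
  | (category, skill_list) :: rest =>
      (category, altReorderOne required_lower skill_list) :: altBuild required_lower rest

def reorder_skills_py_alt (skills : List (String × List String)) (required_skills : List String) : List (String × List String) :=
  altBuild (PySem.Set.ofList (required_skills.map (fun s => PySem.Str.strip (PySem.Str.lower s)))) skills

-- ===== PRECONDITION & SPEC =====
def Spec_reorder_skills_py (skills : List (String × List String)) (required_skills : List String) (out : List (String × List String)) : Prop := out = reorder_skills_py_alt skills required_skills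
instance (skills : List (String × List String)) (required_skills : List String) (out : List (String × List String)) : Decidable (Spec_reorder_skills_py skills required_skills out) := by unfold Spec_reorder_skills_py; infer_instance

-- ===== CLAIM (what is proved, stated in full; the proofs are below) =====
def Claim_equal_reorder_skills_py : Prop := ∀ (skills : List (String × List String)) (required_skills : List String), Dom_reorder_skills_py skills required_skills → Spec_reorder_skills_py skills required_skills (reorder_skills_py skills required_skills)

-- ===== LEMMAS AND PROOFS =====

-- Inserting x into a list that is falses-then-trues (by a Bool key) keeps that shape:
-- a false-key x lands at the boundary, a true-key x at the end.
lemma insertBy_bool_partition {a : Type} (key : a → Bool) (x : a) (F T : List a)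
    (hF : ∀ y ∈ F, key y = false) (hT : ∀ y ∈ T, key y = true) :
    PySem.List.insertBy (fun p q => decide (key p < key q)) x (F ++ T) =
      if key x then F ++ T ++ [x] else F ++ x :: T := by
  by_cases hx : key x = true
  · rw [if_pos hx,
      PySem.List.insertBy_of_forall_not_before _ _ _ (by
        intro y hy
        simp only [hx, decide_eq_false_iff_not]
        exact fun h => absurd (Bool.le_true (key y)) (not_le_of_gt h))]
  · rw [if_neg hx]
    rw [Bool.not_eq_true] at hx
    induction F with
    | nil =>
      cases T with
      | nil => simp [PySem.List.insertBy]
      | cons t ts =>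
        have ht := hT t (by simp)
        simp [PySem.List.insertBy, hx, ht]
    | cons f fs ih =>
      have hf := hF f (by simp)
      have := ih (fun y hy => hF y (by simp [hy]))
      simp only [List.cons_append, PySem.List.insertBy, hx, hf]
      simp [this]

-- The insertion-sort fold over a Bool key, started from a falses-then-trues accumulator,
-- appends the false-key elements after F and the true-key elements after T, in order.
lemma foldl_insertBy_bool_partition {a : Type} (key : a → Bool) (xs : List a) :
    ∀ (F T : List a), (∀ y ∈ F, key y = false) → (∀ y ∈ T, key y = true) →
    xs.foldl (fun acc x => PySem.List.insertBy (fun p q => decide (key p < key q)) x acc) (F ++ T) =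
      (F ++ xs.filter (fun s => !key s)) ++ (T ++ xs.filter key) := by
  induction xs with
  | nil => intro F T _ _; simp
  | cons x xs ih =>
    intro F T hF hT
    simp only [List.foldl_cons, insertBy_bool_partition key x F T hF hT]
    by_cases hx : key x = true
    · rw [if_pos hx]
      have : F ++ T ++ [x] = F ++ (T ++ [x]) := by simp
      rw [this, ih F (T ++ [x]) hF (by intro y hy; rcases List.mem_append.mp hy with h | h
                                       · exact hT y h
                                       · simp at h; simpa [h])]
      simp [hx]
    · rw [if_neg hx]
      rw [Bool.not_eq_true] at hx
      have : F ++ x :: T = (F ++ [x]) ++ T := by simp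
      rw [this, ih (F ++ [x]) T (by intro y hy; rcases List.mem_append.mp hy with h | h
                                    · exact hF y h
                                    · simp at h; simpa [h]) hT]
      simp [hx]

-- Python's stable sort on a Bool key is exactly "false-key elements first, true-key after",
-- each group in original order.
lemma sorted_bool_eq_partition {a : Type} (xs : List a) (key : a → Bool) :
    PySem.List.sorted xs key false = xs.filter (fun s => !key s) ++ xs.filter key := by
  rw [PySem.List.sorted_eq_foldl_insertBy]
  have := foldl_insertBy_bool_partition key xs [] [] (by simp) (by simp)
  simpa using this

-- altBuild is the map of altReorderOne over the items.
lemma altBuild_eq_map (req : PySem.Set String) (xs : List (String × List String)) :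
    altBuild req xs = xs.map (fun cs => (cs.1, altReorderOne req cs.2)) := by
  induction xs with
  | nil => rfl
  | cons cs rest ih => cases cs; simp [altBuild, ih]

theorem reorder_skills_py_spec : Claim_equal_reorder_skills_py := by
  intro skills required_skills _
  unfold Spec_reorder_skills_py reorder_skills_py reorder_skills_py_alt
  rw [altBuild_eq_map, PySem.List.foldl_append_singleton_eq_map]
  apply List.map_congr_left
  intro cs _
  refine congrArg (fun l => (cs.1, l)) ?_
  unfold altReorderOne
  rw [sorted_bool_eq_partition]
  congr 1
  · apply List.filter_congr
    intro s _
    simp [PySem.Set.mem_ofList]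
  · apply List.filter_congr
    intro s _
    simp [PySem.Set.mem_ofList]
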